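-- pv_equiv track=rewrite | github.com/escarr/lhs712_task2 | torchont_task2_code.py | normalize_mentions
-- ===== SOURCE A (Python) =====
-- import string
--
-- def normalize_mentions(text):
--     entity_prefixes = ['@']
--     for separator in  string.punctuation:
--         if separator not in entity_prefixes :
--             text = text.replace(separator,' ')
--     words = []
--     for word in text.split():
--         word = word.strip()
--         if word:
--             if word[0] not in entity_prefixes:
--                 words.append(word)
--             else:
--                 words.append('@username')
--     return ' '.join(words)
-- ===== SOURCE B (Python) =====
-- import string
--
-- def normalize_mentions(text):
--     tokens = []
--     buf = []
--     for ch in text: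
--         if ch.isspace() or (ch in string.punctuation and ch != '@'):
--             if buf:
--                 tokens.append(''.join(buf))
--                 buf = []
--         else:
--             buf.append(ch)
--     if buf:
--         tokens.append(''.join(buf))
--     return ' '.join('@username' if t[0] == '@' else t for t in tokens)
-- ===== Notes on version B (the rewrite author's own statement) =====
-- stated objective: alternative
-- what changed: Replaced the 32 sequential str.replace passes plus split/strip with a single linear character scan that tokenizes on whitespace-or-punctuation(-except-@) directly, then masks mention tokens while joining.
import Mathlib
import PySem

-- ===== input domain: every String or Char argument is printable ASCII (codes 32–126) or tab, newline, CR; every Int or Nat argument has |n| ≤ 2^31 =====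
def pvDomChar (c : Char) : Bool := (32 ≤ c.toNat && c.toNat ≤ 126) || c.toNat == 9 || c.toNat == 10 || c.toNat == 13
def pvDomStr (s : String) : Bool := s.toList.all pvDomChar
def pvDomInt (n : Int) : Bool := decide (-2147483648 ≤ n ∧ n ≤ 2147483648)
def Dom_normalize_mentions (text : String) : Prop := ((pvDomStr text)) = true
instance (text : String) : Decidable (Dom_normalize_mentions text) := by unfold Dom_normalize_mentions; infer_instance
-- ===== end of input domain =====

-- B replaces A's 32 sequential replace passes + split/strip with one linear tokenizing scan (alternative decomposition, same results).

-- string.punctuation (shared constant of both programs)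
def pvPunct : List Char := ['!','"','#','$','%','&','\'','(',')','*','+',',','-','.','/',':',';','<','=','>','?','@','[','\\',']','^','_','`','{','|','}','~']

-- ===== PORT A =====
def normalize_mentions (text : String) : String :=
  let entity_prefixes : List Char := ['@']
  -- for separator in string.punctuation: if separator not in entity_prefixes: text = text.replace(separator, ' ')
  let t := pvPunct.foldl (fun t sep => if sep ∈ entity_prefixes then t else PySem.Chars.replace t [sep] [' ']) text.toList
  -- words = []; for word in text.split(): word = word.strip(); if word: ...
  let words := (PySem.Chars.split₀ t).foldl (fun ws w =>
      let w := PySem.Chars.strip w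
      if w.isEmpty then ws
      else
        -- word[0]: guarded by 'if word', so the index is in range; none is unreachable
        match PySem.List.pyGet? w 0 with
        | some c => if c ∉ entity_prefixes then ws ++ [w] else ws ++ ["@username".toList]
        | none => ws) []
  String.ofList (PySem.Chars.join [' '] words)

-- ===== PORT B =====
-- separator test: ch.isspace() or (ch in string.punctuation and ch != '@')
def pvSep (c : Char) : Bool := PySem.Chars.isspace c || (pvPunct.contains c && c != '@')

-- one step of B's scan: state = (tokens so far, current buffer)
def pvStep (st : List (List Char) × List Char) (c : Char) : List (List Char) × List Char :=
  if pvSep c then (if st.2.isEmpty then st else (st.1 ++ [st.2], [])) else (st.1, st.2 ++ [c])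

def normalize_mentions_alt (text : String) : String :=
  let st := text.toList.foldl pvStep ([], [])
  let tokens := st.1 ++ (if st.2.isEmpty then [] else [st.2])
  String.ofList (PySem.Chars.join [' ']
    (tokens.map (fun t => if PySem.List.pyGet? t 0 = some '@' then "@username".toList else t)))

-- ===== PRECONDITION & SPEC =====
def Spec_normalize_mentions (text : String) (out : String) : Prop := out = normalize_mentions_alt text
instance (text : String) (out : String) : Decidable (Spec_normalize_mentions text out) := by unfold Spec_normalize_mentions; infer_instance

-- ===== CLAIM (what is proved, stated in full; the proofs are below) =====
def Claim_equal_normalize_mentions : Prop := ∀ (text : String), Dom_normalize_mentions text → Spec_normalize_mentions text (normalize_mentions text)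

-- ===== LEMMAS AND PROOFS =====

-- the per-character effect of A's replace cascade
def pvMask (c : Char) : Char := if pvPunct.contains c && c != '@' then ' ' else c

-- replace by a single char is a map
theorem pv_replace_go_map (p : Char) (l : List Char) : ∀ (n : Nat) (acc : List Char), l.length ≤ n →
    PySem.Chars.replace.go [p] [' '] n l acc = acc.reverse ++ l.map (fun c => if c = p then ' ' else c) := by
  induction l with
  | nil => intro n acc _; cases n <;> simp [PySem.Chars.replace.go]
  | cons c t ih =>
    intro n acc hn
    cases n with
    | zero => simp at hn
    | succ m =>
      simp only [PySem.Chars.replace.go]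
      have hm : t.length ≤ m := by simp at hn; omega
      by_cases hc : c = p
      · subst hc
        have hpre : List.isPrefixOf [c] (c :: t) = true := by simp [List.isPrefixOf]
        rw [if_pos hpre]
        simp only [List.length_cons, List.length_nil, Nat.zero_add, List.drop_succ_cons,
          List.drop_zero, List.reverse_cons, List.reverse_nil, List.nil_append,
          List.singleton_append]
        rw [ih m (' ' :: acc) hm]
        simp
      · have hpre : List.isPrefixOf [p] (c :: t) = false := by
          simp [List.isPrefixOf]; exact fun h => (hc h.symm).elim
        rw [if_neg (by simp [hpre])]
        rw [ih m (c :: acc) hm]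
        simp [hc]

theorem pv_replace_map (p : Char) (s : List Char) :
    PySem.Chars.replace s [p] [' '] = s.map (fun c => if c = p then ' ' else c) := by
  simp only [PySem.Chars.replace]
  rw [if_neg (by simp)]
  simpa using pv_replace_go_map p s s.length [] (Nat.le_refl _)

-- the replace fold commutes with map
theorem pv_fold_map (ps : List Char) : ∀ (s : List Char),
    ps.foldl (fun t sep => if sep ∈ ['@'] then t else PySem.Chars.replace t [sep] [' ']) s
      = s.map (fun c => ps.foldl (fun x p => if p ∈ ['@'] then x else if x = p then ' ' else x) c) := by
  induction ps with
  | nil => intro s; simp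
  | cons p ps ih =>
    intro s
    by_cases hp : p ∈ ['@']
    · simp only [List.foldl_cons, if_pos hp]; exact ih s
    · rw [List.foldl_cons, if_neg hp, pv_replace_map, ih]
      rw [List.map_map]
      refine List.map_congr_left fun a _ => ?_
      have hp' : ¬ p = '@' := by simpa using hp
      simp [Function.comp_apply, List.foldl_cons, hp']

-- characters the cascade never touches
theorem pv_fold_keep (c : Char) : ∀ (ps : List Char), (∀ p ∈ ps, p ∈ ['@'] ∨ c ≠ p) →
    ps.foldl (fun x p => if p ∈ ['@'] then x else if x = p then ' ' else x) c = c := by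
  intro ps
  induction ps with
  | nil => intro _; rfl
  | cons p ps ih =>
    intro h
    simp only [List.foldl_cons]
    by_cases hpa : p ∈ ['@']
    · rw [if_pos hpa]; exact ih fun q hq => h q (by simp [hq])
    · rcases h p (by simp) with hp | hp
      · exact absurd hp hpa
      · rw [if_neg hpa, if_neg hp]
        exact ih fun q hq => h q (by simp [hq])

-- pointwise: the cascade equals pvMask
theorem pv_cascade_eq_mask (c : Char) :
    pvPunct.foldl (fun x p => if p ∈ ['@'] then x else if x = p then ' ' else x) c = pvMask c := by
  by_cases h : pvPunct.contains c = true ∧ c ≠ '@'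
  · have hm : c ∈ pvPunct := List.contains_iff_mem.mp h.1
    have hb : (pvPunct.contains c && c != '@') = true := by
      rw [h.1, Bool.true_and]; exact bne_iff_ne.mpr h.2
    have hmv : pvMask c = ' ' := by unfold pvMask; rw [hb]; rfl
    rw [hmv]
    fin_cases hm <;> first | (exact absurd rfl h.2) | decide
  · have hmask : pvMask c = c := by
      simp only [pvMask]
      rcases not_and_or.mp h with h1 | h1
      · simp at h1; simp [h1]
      · simp at h1; simp [h1]
    rw [hmask]
    apply pv_fold_keep
    intro p hp
    rcases not_and_or.mp h with h1 | h1
    · right; intro hcp; exact h1 (by simp [hcp, hp])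
    · simp at h1; subst h1
      by_cases hpa : p = '@'
      · left; simp [hpa]
      · right; exact fun hh => hpa hh.symm

theorem pv_isspace_mask (c : Char) : PySem.Chars.isspace (pvMask c) = pvSep c := by
  unfold pvMask pvSep
  cases hb : (pvPunct.contains c && c != '@')
  · simp
  · have hsp : PySem.Chars.isspace ' ' = true := by decide
    simpa using hsp

theorem pv_mask_of_not_sep (c : Char) (h : pvSep c = false) : pvMask c = c := by
  simp only [pvSep, Bool.or_eq_false_iff] at h
  unfold pvMask
  rw [if_neg (by rw [h.2]; simp)]

-- split₀ of the masked text IS B's scan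
theorem pv_split_eq_scan : ∀ (s cur : List Char) (acc : List (List Char)),
    PySem.Chars.split₀.go (s.map pvMask) cur acc =
      (fun st => st.1 ++ (if st.2.isEmpty then [] else [st.2]))
        (s.foldl pvStep (acc.reverse, cur.reverse)) := by
  intro s
  induction s with
  | nil =>
    intro cur acc
    simp only [List.map_nil, PySem.Chars.split₀.go, List.foldl_nil]
    by_cases h : cur.isEmpty = true
    · have hc : cur = [] := List.isEmpty_iff.mp h
      subst hc
      simp
    · have hc : cur ≠ [] := fun hh => h (by simp [hh])
      simp [hc]
  | cons c rest ih =>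
    intro cur acc
    simp only [List.map_cons, PySem.Chars.split₀.go, pv_isspace_mask, List.foldl_cons, pvStep]
    by_cases hs : pvSep c = true
    · simp only [if_pos hs]
      by_cases hb : cur.isEmpty = true
      · have hc : cur = [] := List.isEmpty_iff.mp hb
        subst hc
        simpa using ih [] acc
      · have hc : cur ≠ [] := fun hh => hb (by simp [hh])
        rw [if_neg hb, ih [] (cur.reverse :: acc)]
        simp [hc]
    · have hs' : pvSep c = false := by simpa using hs
      rw [pv_mask_of_not_sep c hs']
      simp only [if_neg hs]
      rw [ih (c :: cur) acc]
      simp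

-- invariant: every produced token is nonempty and free of separator characters
def pvGood (st : List (List Char) × List Char) : Prop :=
  (∀ t ∈ st.1, t ≠ [] ∧ ∀ c ∈ t, pvSep c = false) ∧ (∀ c ∈ st.2, pvSep c = false)

theorem pv_scan_good : ∀ (s : List Char) (st : List (List Char) × List Char),
    pvGood st → pvGood (s.foldl pvStep st) := by
  intro s
  induction s with
  | nil => intro st h; exact h
  | cons c rest ih =>
    intro st h
    apply ih
    simp only [pvStep]
    by_cases hs : pvSep c = true
    · simp only [if_pos hs]
      by_cases hb : st.2.isEmpty = true
      · rw [if_pos hb]; exact h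
      · rw [if_neg hb]
        refine ⟨?_, by simp⟩
        intro t ht
        rcases List.mem_append.mp ht with ht | ht
        · exact h.1 t ht
        · simp at ht; subst ht
          exact ⟨by simp_all [List.isEmpty_iff], h.2⟩
    · have hs' : pvSep c = false := by simpa using hs
      rw [if_neg hs]
      refine ⟨h.1, ?_⟩
      intro d hd
      rcases List.mem_append.mp hd with hd | hd
      · exact h.2 d hd
      · simp at hd; subst hd; exact hs'

-- strip is the identity on whitespace-free words
theorem pv_strip_id (w : List Char) (h : ∀ c ∈ w, pvSep c = false) : PySem.Chars.strip w = w := by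
  have hsp : ∀ c ∈ w, PySem.Chars.isspace c = false := by
    intro c hc
    have := h c hc
    simp only [pvSep, Bool.or_eq_false_iff] at this
    exact this.1
  have h1 : PySem.Chars.lstrip w = w := by
    simp only [PySem.Chars.lstrip]
    apply List.dropWhile_eq_self_iff.mpr
    intro hw
    simp [hsp _ (List.getElem_mem hw)]
  simp only [PySem.Chars.strip, h1, PySem.Chars.rstrip]
  rw [List.dropWhile_eq_self_iff.mpr]
  · simp
  · intro hw
    have hlen : w.length - 1 < w.length := by simp at hw; omega
    have hlast : PySem.Chars.isspace w[w.length - 1] = false := hsp _ (List.getElem_mem hlen)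
    simp [List.getElem_reverse, hlast]

-- A's word loop equals B's map on good tokens
theorem pv_words_eq (ws : List (List Char))
    (h : ∀ t ∈ ws, t ≠ [] ∧ ∀ c ∈ t, pvSep c = false) : ∀ (acc : List (List Char)),
    ws.foldl (fun acc w =>
      let w := PySem.Chars.strip w
      if w.isEmpty then acc
      else
        match PySem.List.pyGet? w 0 with
        | some c => if c ∉ ['@'] then acc ++ [w] else acc ++ ["@username".toList]
        | none => acc) acc
    = acc ++ ws.map (fun t => if PySem.List.pyGet? t 0 = some '@' then "@username".toList else t) := by
  induction ws with
  | nil => intro acc; simp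
  | cons w ws ih =>
    intro acc
    have hw := h w (by simp)
    obtain ⟨c, t, rfl⟩ : ∃ c t, w = c :: t := by
      cases w with
      | nil => exact absurd rfl hw.1
      | cons c t => exact ⟨c, t, rfl⟩
    have hstrip : PySem.Chars.strip (c :: t) = c :: t := pv_strip_id _ hw.2
    have hrest : ∀ u ∈ ws, u ≠ [] ∧ ∀ d ∈ u, pvSep d = false := fun u hu => h u (by simp [hu])
    have hget : PySem.List.pyGet? (c :: t) 0 = some c := by
      simp [PySem.List.pyGet?, PySem.List.pyIdx?]
    simp only [List.foldl_cons, List.map_cons]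
    rw [ih hrest]
    by_cases hc : c = '@'
    · subst hc
      simp [hstrip]
    · simp [hstrip, hc]

-- ===== VERDICT (by name: the statement is the Claim_ definition above) =====
theorem normalize_mentions_spec : Claim_equal_normalize_mentions := by
  intro text _
  unfold Spec_normalize_mentions normalize_mentions normalize_mentions_alt
  simp only []
  have hmask : pvPunct.foldl (fun t sep => if sep ∈ ['@'] then t else PySem.Chars.replace t [sep] [' ']) text.toList = text.toList.map pvMask := by
    rw [pv_fold_map]
    exact List.map_congr_left (fun c _ => pv_cascade_eq_mask c)
  rw [hmask]
  have hsplit : PySem.Chars.split₀ (text.toList.map pvMask) =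
      (fun st => st.1 ++ (if st.2.isEmpty then [] else [st.2])) (text.toList.foldl pvStep ([], [])) := by
    have := pv_split_eq_scan text.toList [] []
    simpa [PySem.Chars.split₀] using this
  rw [hsplit]
  have hgood : pvGood (text.toList.foldl pvStep ([], [])) :=
    pv_scan_good text.toList ([], []) ⟨by simp, by simp⟩
  set st := text.toList.foldl pvStep ([], []) with hst
  have htoks : ∀ t ∈ st.1 ++ (if st.2.isEmpty then [] else [st.2]), t ≠ [] ∧ ∀ c ∈ t, pvSep c = false := by
    intro t ht
    rcases List.mem_append.mp ht with ht | ht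
    · exact hgood.1 t ht
    · by_cases hb : st.2.isEmpty = true
      · rw [if_pos hb] at ht
        exact absurd ht (List.not_mem_nil)
      · rw [if_neg hb, List.mem_singleton] at ht
        subst ht
        exact ⟨fun hh => hb (by simp [hh]), hgood.2⟩
  rw [pv_words_eq _ htoks []]
  simp
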